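-- pv_equiv track=rewrite | github.com/tchxyc/leetcode | contest/biweekly-117/4.maximum-spending-after-buying-items/solution.py | maxSpending
-- ===== SOURCE A (Python) =====
-- from heapq import heapify, heappop, heappush, heappushpop, heapreplace
-- from typing import List, Optional
--
-- def maxSpending(values: List[List[int]]) -> int:
--     m = len(values)
--     n = len(values[0])
--
--     q = []
--     for i in range(m):
--         heappush(q, (values[i][-1], i))
--
--     res = 0
--     for j in range(1, m * n + 1):
--         x, i = heappop(q)
--         res += x * j
--         values[i].pop()
--         if values[i]:
--             heappush(q, (values[i][-1], i))
--     return res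
-- ===== SOURCE B (Python) =====
-- def maxSpending(values):
--     # Same greedy as the task needs, but without a priority queue: each of the
--     # m*n steps picks the smallest current row-tail (ties -> smallest row index)
--     # by a direct scan.  Mutates `values` exactly like A (pops m*n elements).
--     total = len(values) * len(values[0])
--     res = 0
--     for j in range(1, total + 1):
--         x, i = min((row[-1], k) for k, row in enumerate(values) if row)
--         res += x * j
--         values[i].pop()
--     return res
-- ===== Notes on version B (the rewrite author's own statement) =====
-- stated objective: simpler
-- what changed: The heap of per-row tails (heappush/heappop bookkeeping) is replaced by a stateless per-step min() scan over the current row tails; no priority queue is maintained.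
import Mathlib
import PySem

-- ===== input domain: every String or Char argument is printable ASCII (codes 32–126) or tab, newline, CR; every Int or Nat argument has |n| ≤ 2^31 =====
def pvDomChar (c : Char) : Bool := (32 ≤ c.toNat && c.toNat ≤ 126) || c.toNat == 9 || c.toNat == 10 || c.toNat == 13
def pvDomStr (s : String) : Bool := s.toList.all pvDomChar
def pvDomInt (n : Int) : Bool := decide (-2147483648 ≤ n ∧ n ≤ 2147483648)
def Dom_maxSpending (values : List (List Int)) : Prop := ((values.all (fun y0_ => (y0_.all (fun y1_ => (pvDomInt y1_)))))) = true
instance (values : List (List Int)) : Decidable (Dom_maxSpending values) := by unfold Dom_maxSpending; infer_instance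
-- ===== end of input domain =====

-- B replaces A's heap of row tails by a stateless per-step min-scan over the current
-- row tails (same greedy, no priority queue); equivalence is about the RETURN value
-- (both Pythons additionally drain the rows by pop() in the same way).


-- ===== PORT A =====
-- Python tuple comparison (x, i) < (y, k) on int pairs
def pvLt (a b : Int × Int) : Bool := a.1 < b.1 || (a.1 == b.1 && a.2 < b.2)

-- heapq modelled on the heap's multiset: heappop returns the minimum tuple.  Exact:
-- heappop always yields the least element under tuple comparison, and here the heap
-- holds at most one entry per row index, so the minimum is unique.
def pvHeapMin (q : List (Int × Int)) : Option (Int × Int) :=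
  q.foldl (fun acc c => match acc with
    | none => some c
    | some b => if pvLt c b then some c else some b) none

-- one iteration of A's main loop: heappop, res += x*j, values[i].pop(), re-push
def pvStepA (st : List (List Int) × List (Int × Int) × Int) (j : Int) :
    List (List Int) × List (Int × Int) × Int :=
  match pvHeapMin st.2.1 with
  | none => st            -- heappop from an empty heap: IndexError (excluded by Pre_)
  | some e =>
    let x := e.1
    let i := e.2
    let q' := (st.2.1).erase e                           -- heappop removes the minimum
    let row := (PySem.List.pyGetD st.1 i []).dropLast    -- values[i].pop()
    let vs' := st.1.set i.toNat row                      -- i ∈ range(m), so i ≥ 0: exact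
    let q'' := if row.isEmpty then q' else q' ++ [(row.getLastD 0, i)]  -- if values[i]: heappush
    (vs', q'', st.2.2 + x * j)

def maxSpending (values : List (List Int)) : Int :=
  let m : Int := values.length
  let n : Int := (values.headD []).length     -- len(values[0]); Pre_ gives values ≠ []
  -- for i in range(m): heappush(q, (values[i][-1], i)); rows are nonempty under Pre_
  let q0 : List (Int × Int) := (PySem.List.pyRange 0 m 1).foldl
      (fun q i => q ++ [((PySem.List.pyGetD values i []).getLastD 0, i)]) []
  let fin := (PySem.List.pyRange 1 (m * n + 1) 1).foldl pvStepA (values, q0, (0 : Int))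
  fin.2.2

-- ===== PORT B =====
-- Python min() over the generator: keeps the FIRST minimal tuple (strict-less replaces)
def pvMinScan (l : List (Int × Int)) : Option (Int × Int) :=
  l.foldl (fun acc c => match acc with
    | none => some c
    | some b => if c.1 < b.1 || (c.1 == b.1 && c.2 < b.2) then some c else some b) none

-- one iteration of B's loop: min over current tails, res += x*j, values[i].pop()
def pvStepB (st : List (List Int) × Int) (j : Int) : List (List Int) × Int :=
  let cands := (PySem.List.enumerate st.1).filterMap
      (fun p => if p.2.isEmpty then none else some (p.2.getLastD 0, p.1))
  match pvMinScan cands with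
  | none => st            -- min() of an empty sequence: ValueError (excluded by Pre_)
  | some e =>
    (st.1.set e.2.toNat ((PySem.List.pyGetD st.1 e.2 []).dropLast), st.2 + e.1 * j)

def maxSpending_alt (values : List (List Int)) : Int :=
  let total : Int := (values.length : Int) * ((values.headD []).length : Int)
  ((PySem.List.pyRange 1 (total + 1) 1).foldl pvStepB (values, (0 : Int))).2

-- ===== PRECONDITION & SPEC =====
-- Exactly where Python A returns: values[0] must exist, every initial heappush needs a
-- nonempty row, and the m*n heappops need at least m*n elements in total.
def Pre_maxSpending (values : List (List Int)) : Prop :=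
  values ≠ [] ∧ (∀ r ∈ values, r ≠ []) ∧
  values.length * (values.headD []).length ≤ (values.map List.length).sum
instance (values : List (List Int)) : Decidable (Pre_maxSpending values) := by
  unfold Pre_maxSpending; infer_instance

def pvWitness_maxSpending : List (List Int) := [[3, 2], [5, 1]]

def Spec_maxSpending (values : List (List Int)) (out : Int) : Prop := out = maxSpending_alt values
instance (values : List (List Int)) (out : Int) : Decidable (Spec_maxSpending values out) := by unfold Spec_maxSpending; infer_instance

-- ===== CLAIM (what is proved, stated in full; the proofs are below) =====
def Claim_equal_maxSpending : Prop := ∀ (values : List (List Int)), Dom_maxSpending values → Pre_maxSpending values → Spec_maxSpending values (maxSpending values)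

-- ===== LEMMAS AND PROOFS =====

-- current tails of the rows from offset k: entry (row[-1], index) for each nonempty row
def pvTails (k : Int) (vs : List (List Int)) : List (Int × Int) :=
  match vs with
  | [] => []
  | r :: rest => if r.isEmpty then pvTails (k + 1) rest
                 else (r.getLastD 0, k) :: pvTails (k + 1) rest

theorem pvLt_asymm {a b : Int × Int} (h : pvLt a b = true) : pvLt b a = false := by
  rcases a with ⟨a1, a2⟩; rcases b with ⟨b1, b2⟩
  simp [pvLt] at *; omega

theorem pvLt_trans {a b c : Int × Int} (h1 : pvLt a b = true) (h2 : pvLt b c = true) :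
    pvLt a c = true := by
  rcases a with ⟨a1, a2⟩; rcases b with ⟨b1, b2⟩; rcases c with ⟨c1, c2⟩
  simp [pvLt] at *; omega

theorem pvLt_total {a b : Int × Int} (h1 : pvLt a b = false) (h2 : pvLt b a = false) :
    a = b := by
  rcases a with ⟨a1, a2⟩; rcases b with ⟨b1, b2⟩
  simp [pvLt] at *; omega

theorem pvMinScan_eq_pvHeapMin (l : List (Int × Int)) : pvMinScan l = pvHeapMin l := rfl

-- the foldl-min starting from `some b` returns an element of b::l minimal in b::l
theorem pvHeapMin_go_spec (l : List (Int × Int)) : ∀ (b : Int × Int),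
    ∃ m, l.foldl (fun acc c => match acc with
      | none => some c
      | some b => if pvLt c b then some c else some b) (some b) = some m ∧
      (m = b ∨ m ∈ l) ∧ (∀ x, (x = b ∨ x ∈ l) → pvLt x m = false) := by
  induction l with
  | nil =>
    intro b
    refine ⟨b, rfl, Or.inl rfl, ?_⟩
    rintro x (rfl | hx)
    · cases h : pvLt x x with
      | false => rfl
      | true => exact absurd (pvLt_asymm h) (by simp [h])
    · simp at hx
  | cons c l ih =>
    intro b
    rcases ih (if pvLt c b then c else b) with ⟨m, hm, hmem, hmin⟩
    refine ⟨m, ?_, ?_, ?_⟩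
    · rw [List.foldl_cons]
      have hstep : (match some b with
            | none => some c
            | some bb => if pvLt c bb then some c else some bb) =
          some (if pvLt c b then c else b) := by
        by_cases h : pvLt c b = true <;> simp [h]
      rw [hstep]; exact hm
    · rcases hmem with h | h
      · by_cases hcb : pvLt c b = true
        · rw [if_pos hcb] at h; exact Or.inr (by simp [h])
        · rw [if_neg hcb] at h; exact Or.inl h
      · exact Or.inr (List.mem_cons_of_mem _ h)
    · rintro x (rfl | hx)
      · -- x = b
        by_cases hcb : pvLt c x = true
        · have hcm := hmin c (Or.inl (by simp [hcb]))
          cases h : pvLt x m with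
          | false => rfl
          | true => exact absurd (pvLt_trans hcb h) (by simp [hcm])
        · exact hmin x (Or.inl (by simp [hcb]))
      · rcases List.mem_cons.mp hx with rfl | hx
        · -- x = c
          by_cases hcb : pvLt x b = true
          · exact hmin x (Or.inl (by simp [hcb]))
          · have hbm := hmin b (Or.inl (by simp [hcb]))
            have hcb' : pvLt x b = false := by simpa using hcb
            cases h : pvLt x m with
            | false => rfl
            | true =>
              cases hbx : pvLt b x with
              | false =>
                have hxb : x = b := pvLt_total hcb' hbx
                rw [hxb, hbm] at h; exact h.symm ▸ rfl
              | true => exact absurd (pvLt_trans hbx h) (by simp [hbm])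
        · exact hmin x (Or.inr hx)

theorem pvHeapMin_spec {l : List (Int × Int)} {m : Int × Int}
    (h : pvHeapMin l = some m) : m ∈ l ∧ ∀ x ∈ l, pvLt x m = false := by
  cases l with
  | nil => simp [pvHeapMin] at h
  | cons b l =>
    rcases pvHeapMin_go_spec l b with ⟨m', hm', hmem, hmin⟩
    have : m' = m := by
      have : pvHeapMin (b :: l) = some m' := by simpa [pvHeapMin] using hm'
      rw [this] at h; exact Option.some.inj h
    subst this
    constructor
    · rcases hmem with rfl | h2
      · exact List.mem_cons_self
      · exact List.mem_cons_of_mem _ h2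
    · intro x hx
      rcases List.mem_cons.mp hx with rfl | hx
      · exact hmin x (Or.inl rfl)
      · exact hmin x (Or.inr hx)

theorem pvHeapMin_isSome {l : List (Int × Int)} (h : l ≠ []) :
    ∃ m, pvHeapMin l = some m := by
  cases l with
  | nil => exact absurd rfl h
  | cons b l =>
    rcases pvHeapMin_go_spec l b with ⟨m, hm, _, _⟩
    exact ⟨m, by simpa [pvHeapMin] using hm⟩

-- the minimum is the same across a permutation
theorem pvHeapMin_perm {l1 l2 : List (Int × Int)} (h : l1.Perm l2) :
    pvHeapMin l1 = pvHeapMin l2 := by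
  cases h1 : pvHeapMin l1 with
  | none =>
    have : l1 = [] := by
      cases l1 with
      | nil => rfl
      | cons b l => rcases pvHeapMin_isSome (l := b :: l) (by simp) with ⟨m, hm⟩; simp [hm] at h1
    subst this
    have hl2 : l2 = [] := h.symm.eq_nil
    subst hl2
    exact h1.symm
  | some m1 =>
    have hne2 : l2 ≠ [] := by
      intro h2; subst h2
      simp [h.eq_nil, pvHeapMin] at h1
    rcases pvHeapMin_isSome hne2 with ⟨m2, h2⟩
    rcases pvHeapMin_spec h1 with ⟨hm1, hmin1⟩
    rcases pvHeapMin_spec h2 with ⟨hm2, hmin2⟩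
    have e1 := hmin1 m2 (h.symm.subset hm2)
    have e2 := hmin2 m1 (h.subset hm1)
    rw [h2, pvLt_total e2 e1]

-- membership in pvTails: entries are exactly the tails of the nonempty rows
theorem pvTails_mem {x i : Int} : ∀ (k : Int) (vs : List (List Int)),
    (x, i) ∈ pvTails k vs →
    ∃ j : Nat, i = k + j ∧ j < vs.length ∧ vs.getD j [] ≠ [] ∧
      x = (vs.getD j []).getLastD 0 := by
  intro k vs
  induction vs generalizing k with
  | nil => simp [pvTails]
  | cons r rest ih =>
    intro h
    by_cases hr : r.isEmpty
    · simp [pvTails, hr] at h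
      rcases ih (k + 1) h with ⟨j, hj1, hj2, hj3, hj4⟩
      exact ⟨j + 1, by omega, by simpa using hj2, by simpa using hj3, by simpa using hj4⟩
    · simp [pvTails, hr] at h
      rcases h with ⟨h1, h2⟩ | h
      · exact ⟨0, by omega, by simp, by simpa [List.isEmpty_iff] using hr, by simp [h1]⟩
      · rcases ih (k + 1) h with ⟨j, hj1, hj2, hj3, hj4⟩
        exact ⟨j + 1, by omega, by simpa using hj2, by simpa using hj3, by simpa using hj4⟩

-- updating row j replaces its tail entry (multiset view)
theorem pvTails_set (r' : List Int) : ∀ (vs : List (List Int)) (k : Int) (j : Nat),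
    j < vs.length → vs.getD j [] ≠ [] →
    (pvTails k (vs.set j r')).Perm
      (((pvTails k vs).erase ((vs.getD j []).getLastD 0, k + j)) ++
        (if r'.isEmpty then [] else [(r'.getLastD 0, k + j)])) := by
  intro vs
  induction vs with
  | nil => intro k j h; simp at h
  | cons r0 rest ih =>
    intro k j hj hne
    cases j with
    | zero =>
      have hgd : (r0 :: rest).getD 0 [] = r0 := rfl
      rw [hgd] at hne
      have hr0 : r0.isEmpty = false := by simpa [List.isEmpty_iff] using hne
      have htails : pvTails k (r0 :: rest) = (r0.getLastD 0, k) :: pvTails (k + 1) rest := by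
        simp [pvTails, hr0]
      have hset : (r0 :: rest).set 0 r' = r' :: rest := rfl
      rw [hset, hgd]
      simp only [Nat.cast_zero, add_zero]
      rw [htails, List.erase_cons_head]
      by_cases hr' : r'.isEmpty
      · simp [pvTails, hr']
      · have hT : pvTails k (r' :: rest) = (r'.getLastD 0, k) :: pvTails (k + 1) rest := by
          simp [pvTails, hr']
        rw [hT, if_neg (by simp [hr'])]
        have := List.perm_append_comm (l₁ := [(r'.getLastD 0, k)]) (l₂ := pvTails (k + 1) rest)
        simpa using this
    | succ j =>
      have hjlt : j < rest.length := by simpa using hj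
      have hget : (r0 :: rest).getD (j + 1) [] = rest.getD j [] := rfl
      rw [hget] at hne ⊢
      have hset : (r0 :: rest).set (j + 1) r' = r0 :: rest.set j r' := rfl
      rw [hset]
      have harith : k + ((j + 1 : Nat) : Int) = (k + 1) + (j : Nat) := by push_cast; ring
      rw [harith]
      by_cases hr0 : r0.isEmpty
      · have h1 : pvTails k (r0 :: rest.set j r') = pvTails (k + 1) (rest.set j r') := by
          simp [pvTails, hr0]
        have h2 : pvTails k (r0 :: rest) = pvTails (k + 1) rest := by simp [pvTails, hr0]
        rw [h1, h2]
        exact ih (k + 1) j hjlt hne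
      · have h1 : pvTails k (r0 :: rest.set j r') =
            (r0.getLastD 0, k) :: pvTails (k + 1) (rest.set j r') := by
          simp [pvTails, hr0]
        have h2 : pvTails k (r0 :: rest) = (r0.getLastD 0, k) :: pvTails (k + 1) rest := by
          simp [pvTails, hr0]
        have hhd : ¬ ((r0.getLastD 0, k) = ((rest.getD j []).getLastD 0, (k + 1) + (j : Nat))) := by
          intro hcontra
          have := congrArg Prod.snd hcontra
          simp at this
          omega
        rw [h1, h2, List.erase_cons_tail (by simpa using hhd)]
        have := (ih (k + 1) j hjlt hne).cons ((r0.getLastD 0, k))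
        simpa using this

-- B's candidate list IS pvTails
theorem pvCands_eq_pvTails : ∀ (vs : List (List Int)) (k : Int),
    (PySem.List.enumerate vs k).filterMap
      (fun p => if p.2.isEmpty then none else some (p.2.getLastD 0, p.1)) = pvTails k vs := by
  intro vs
  induction vs with
  | nil => intro k; simp [pvTails, PySem.List.enumerate_nil]
  | cons r rest ih =>
    intro k
    rw [PySem.List.enumerate_cons]
    by_cases hr : r = []
    · have ih' := ih (k + 1)
      simp at ih'
      simp [pvTails, hr, ih']
    · have ih' := ih (k + 1)
      simp at ih'
      simp [pvTails, hr, ih']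

-- A's initial heap equals the tails of the (all-nonempty) rows
theorem pvFoldAppend {α β : Type} (g : α → β) : ∀ (l : List α) (acc : List β),
    l.foldl (fun q i => q ++ [g i]) acc = acc ++ l.map g := by
  intro l
  induction l with
  | nil => simp
  | cons a l ih => intro acc; simp [ih, List.map_cons]

theorem pvTails_eq_map : ∀ (vs : List (List Int)) (k : Int), (∀ r ∈ vs, r ≠ []) →
    pvTails k vs = (List.range vs.length).map
      (fun j => ((vs.getD j []).getLastD 0, k + j)) := by
  intro vs
  induction vs with
  | nil => intro k _; simp [pvTails]
  | cons r rest ih =>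
    intro k h
    have hr : r.isEmpty = false := by
      simpa [List.isEmpty_iff] using h r List.mem_cons_self
    simp only [List.length_cons]
    rw [List.range_succ_eq_map]
    simp only [pvTails, hr, Bool.false_eq_true, if_false, List.map_cons, List.map_map]
    congr 1
    · simp
    · rw [ih (k + 1) (fun r hr => h r (List.mem_cons_of_mem _ hr))]
      apply List.map_congr_left
      intro j hj
      simp [Function.comp]
      omega

-- the main invariant: the heap is (a permutation of) the current tails
theorem pvFold_inv : ∀ (js : List Int) (vs : List (List Int)) (q : List (Int × Int)) (res : Int),
    q.Perm (pvTails 0 vs) →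
    (js.foldl pvStepA (vs, q, res)).1 = (js.foldl pvStepB (vs, res)).1 ∧
    ((js.foldl pvStepA (vs, q, res)).2.1).Perm (pvTails 0 (js.foldl pvStepA (vs, q, res)).1) ∧
    (js.foldl pvStepA (vs, q, res)).2.2 = (js.foldl pvStepB (vs, res)).2 := by
  intro js
  induction js with
  | nil => intro vs q res h; exact ⟨rfl, h, rfl⟩
  | cons j js ih =>
    intro vs q res h
    have hmin : pvHeapMin q = pvHeapMin (pvTails 0 vs) := pvHeapMin_perm h
    have hcands : (PySem.List.enumerate vs 0).filterMap
        (fun p => if p.2.isEmpty then none else some (p.2.getLastD 0, p.1)) = pvTails 0 vs :=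
      pvCands_eq_pvTails vs 0
    cases he : pvHeapMin (pvTails 0 vs) with
    | none =>
      have hA : pvStepA (vs, q, res) j = (vs, q, res) := by
        simp [pvStepA, hmin, he]
      have hB : pvStepB (vs, res) j = (vs, res) := by
        simp only [pvStepB, hcands]
        rw [pvMinScan_eq_pvHeapMin, he]
      rw [List.foldl_cons, List.foldl_cons, hA, hB]
      exact ih vs q res h
    | some e =>
      rcases pvHeapMin_spec he with ⟨hmem, _⟩
      rcases e with ⟨x, i⟩
      rcases pvTails_mem 0 vs hmem with ⟨jj, hi, hjlt, hrow, hx⟩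
      have hi' : i.toNat = jj := by omega
      have hgetD : PySem.List.pyGetD vs i [] = vs.getD jj [] := by
        rw [show i = ((jj : Nat) : Int) by omega, PySem.List.pyGetD_natCast]
      have hA : pvStepA (vs, q, res) j =
          (vs.set jj ((vs.getD jj []).dropLast),
           (q.erase (x, i)) ++ (if ((vs.getD jj []).dropLast).isEmpty then []
             else [(((vs.getD jj []).dropLast).getLastD 0, i)]), res + x * j) := by
        simp only [pvStepA, hmin, he, hgetD, hi']
        split <;> simp_all
      have hB : pvStepB (vs, res) j = (vs.set jj ((vs.getD jj []).dropLast), res + x * j) := by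
        simp only [pvStepB, hcands]
        rw [pvMinScan_eq_pvHeapMin, he]
        simp [hgetD, hi']
      rw [List.foldl_cons, List.foldl_cons, hA, hB]
      apply ih
      -- new heap ~ tails of updated rows
      have hperm1 : (q.erase (x, i)).Perm ((pvTails 0 vs).erase (x, i)) := h.erase _
      have hset := pvTails_set ((vs.getD jj []).dropLast) vs 0 jj hjlt hrow
      have hxy : ((vs.getD jj []).getLastD 0, (0 : Int) + (jj : Nat)) = (x, i) := by
        rw [← hx]; congr 1; omega
      rw [hxy] at hset
      have hopt : (if ((vs.getD jj []).dropLast).isEmpty then ([] : List (Int × Int))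
          else [(((vs.getD jj []).dropLast).getLastD 0, i)]) =
          (if ((vs.getD jj []).dropLast).isEmpty then []
          else [(((vs.getD jj []).dropLast).getLastD 0, (0 : Int) + (jj : Nat))]) := by
        split <;> simp_all
      rw [hopt]
      exact (hperm1.append_right _).trans hset.symm

-- ===== VERDICT (by name: the statement is the Claim_ definition above) =====
theorem maxSpending_spec : Claim_equal_maxSpending := by
  intro values _ hpre
  rcases hpre with ⟨hne, hrows, _⟩
  unfold Spec_maxSpending maxSpending maxSpending_alt
  -- the initial heap equals pvTails 0 values
  have hq0 : ((PySem.List.pyRange 0 (values.length : Int) 1).foldl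
      (fun q i => q ++ [((PySem.List.pyGetD values i []).getLastD 0, i)]) []) =
      pvTails 0 values := by
    rw [pvFoldAppend]
    rw [pvTails_eq_map values 0 hrows]
    rw [PySem.List.pyRange_one]
    simp only [List.map_map]
    apply List.map_congr_left
    intro j hj
    simp at hj
    have h0 : ((0 : Int) + (j : Int)) = (j : Int) := by ring
    simp [Function.comp, h0, PySem.List.pyGetD_natCast]
  have := pvFold_inv (PySem.List.pyRange 1 ((values.length : Int) * ((values.headD []).length : Int) + 1) 1)
      values (pvTails 0 values) 0 (List.Perm.refl _)
  simp only [hq0]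
  exact (this.2.2)
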